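-- pv_equiv track=rewrite | github.com/aksaraaa006/airhead-research | trunk/scorer.py | leskScore
-- ===== SOURCE A (Python) =====
-- def leskScore(syn1, syn2, def1, def2):
--   score = 0
--   for word in def1:
--     if not word:
--       continue
--     if word in def2:
--       score += 1
--   return score
-- ===== SOURCE B (Python) =====
-- def leskScore(syn1, syn2, def1, def2):
--     return sum(def1.count(w) for w in set(def1) if w and w in def2)
-- ===== Notes on version B (the rewrite author's own statement) =====
-- stated objective: alternative
-- what changed: B iterates over the distinct words of def1 (a set) and sums def1.count(w) for each truthy word found in def2, instead of A's per-occurrence loop with a running counter; multiplicity is preserved by the stored count.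
import Mathlib
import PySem

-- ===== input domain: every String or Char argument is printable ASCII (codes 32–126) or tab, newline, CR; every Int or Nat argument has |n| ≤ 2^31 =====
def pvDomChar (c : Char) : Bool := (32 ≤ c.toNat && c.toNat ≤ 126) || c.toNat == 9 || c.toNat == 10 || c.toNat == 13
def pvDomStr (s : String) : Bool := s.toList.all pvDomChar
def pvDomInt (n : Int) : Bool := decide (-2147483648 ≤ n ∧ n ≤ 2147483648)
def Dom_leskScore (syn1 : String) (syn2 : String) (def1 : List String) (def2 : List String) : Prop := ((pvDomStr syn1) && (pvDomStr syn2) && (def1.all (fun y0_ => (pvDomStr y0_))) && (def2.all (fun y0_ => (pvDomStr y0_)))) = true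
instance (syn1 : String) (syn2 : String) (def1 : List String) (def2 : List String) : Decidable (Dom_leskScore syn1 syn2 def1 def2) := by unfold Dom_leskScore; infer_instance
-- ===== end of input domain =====

-- B iterates over the distinct words of def1 (a set) and sums def1.count(w) for each truthy
-- word found in def2, instead of A's running counter over every occurrence (alternative).


-- ===== PORT A =====
-- literal port of A: loop over def1, skip falsy words, score += 1 per occurrence found in def2
def leskScore (syn1 : String) (syn2 : String) (def1 : List String) (def2 : List String) : Int :=
  def1.foldl (fun score word =>
    if word = "" then score
    else if def2.contains word then score + 1 else score) 0

-- ===== PORT B =====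
-- literal port of Source B: sum(def1.count(w) for w in set(def1) if w and w in def2)
-- (the sum of a generator over a set is order-independent, so Set.ofList is exact here)
def leskScore_alt (syn1 : String) (syn2 : String) (def1 : List String) (def2 : List String) : Int :=
  (((PySem.Set.ofList def1).filter (fun w => !(w == "") && def2.contains w)).map
    (fun w => (PySem.List.count def1 w : Int))).sum

-- ===== PRECONDITION & SPEC =====
def Spec_leskScore (syn1 : String) (syn2 : String) (def1 : List String) (def2 : List String) (out : Int) : Prop := out = leskScore_alt syn1 syn2 def1 def2
instance (syn1 : String) (syn2 : String) (def1 : List String) (def2 : List String) (out : Int) : Decidable (Spec_leskScore syn1 syn2 def1 def2 out) := by unfold Spec_leskScore; infer_instance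

-- ===== CLAIM (what is proved, stated in full; the proofs are below) =====
def Claim_equal_leskScore : Prop := ∀ (syn1 : String) (syn2 : String) (def1 : List String) (def2 : List String), Dom_leskScore syn1 syn2 def1 def2 → Spec_leskScore syn1 syn2 def1 def2 (leskScore syn1 syn2 def1 def2)

-- ===== LEMMAS AND PROOFS =====

-- A's loop counts the occurrences satisfying the combined predicate
theorem leskA_loop (def2 : List String) :
    ∀ (xs : List String) (acc : Int),
      xs.foldl (fun score word =>
        if word = "" then score
        else if def2.contains word then score + 1 else score) acc
      = acc + (xs.countP (fun w => !(w == "") && def2.contains w) : Int) := by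
  intro xs
  induction xs with
  | nil => intro acc; simp
  | cons a as ih =>
    intro acc
    simp only [List.foldl_cons, List.countP_cons, ih]
    by_cases ha : a = "" <;> by_cases hc : a ∈ def2 <;>
      simp [ha, hc] <;> push_cast <;> ring_nf

-- summing the multiplicity of each distinct selected word recovers the per-occurrence count
theorem key_count (xs : List String) (q : String → Bool) :
    (((PySem.Set.ofList xs).filter q).map (fun k => (xs.count k : Int))).sum
      = (xs.countP q : Int) := by
  have hperm : (PySem.Set.ofList xs).Perm xs.dedup := by
    rw [List.perm_ext_iff_of_nodup (PySem.Set.nodup_ofList xs) (List.nodup_dedup xs)]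
    intro x
    simp [PySem.Set.mem_ofList, List.mem_dedup]
  rw [(((hperm.filter q).map _).sum_eq : _)]
  have : ((xs.dedup.filter q).map (fun k => (xs.count k : Int))).sum
      = (((xs.dedup.filter q).map (fun k => xs.count k)).sum : Int) := by
    rw [Nat.cast_list_sum, List.map_map]; rfl
  rw [this, List.sum_map_count_dedup_filter_eq_countP]

-- ===== VERDICT (by name: the statement is the Claim_ definition above) =====
theorem leskScore_spec : Claim_equal_leskScore := by
  intro syn1 syn2 def1 def2 _
  unfold Spec_leskScore leskScore leskScore_alt
  simp only [PySem.List.count_eq]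
  rw [leskA_loop, key_count, zero_add]
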